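-- pv_equiv track=rewrite | github.com/ml-research/ActivationReasoning | ar/utils.py | replace_or_with_xor
-- ===== SOURCE A (Python) =====
-- def replace_or_with_xor(tokens):
--     """
--     Finds occurrences of "but not both", changes the preceding "or" to "xor",
--     and removes the "but not both" token.
--
--     This function iterates through a list of tokens. For each instance of the
--     string "but not both", it searches backwards to find the nearest preceding
--     "or" and replaces it with "xor". It then removes the "but not both" token.
--
--     Args:
--         tokens: A list of strings.
--
--     Returns:
--         A new list with the appropriate "or" tokens replaced by "xor" and
--         "but not both" tokens removed.
--     """
--     # Create a copy of the list to avoid modifying the original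
--     new_tokens = list(tokens)
--
--     # Find the indices of all occurrences of "but not both"
--     bnb_indices = [i for i, token in enumerate(new_tokens) if token == "but not both"]
--
--     # Iterate backwards through the indices to safely remove items
--     for index in sorted(bnb_indices, reverse=True):
--         # Search backwards from the current index to find the closest "or"
--         # The range goes from (index - 1) down to 0.
--         for i in range(index - 1, -1, -1):
--             if new_tokens[i] == "or":
--                 # Replace the found "or" with "xor"
--                 new_tokens[i] = "xor"
--                 # Break the inner loop once the closest "or" is found and replaced
--                 break
--
--         # Remove the "but not both" token
--         del new_tokens[index]
--
--     return new_tokens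
-- ===== SOURCE B (Python) =====
-- def replace_or_with_xor(tokens):
--     # One backward pass: count pending "but not both" markers; each "or" met
--     # while pending > 0 is the nearest preceding "or" of some marker -> "xor".
--     out = []
--     pending = 0
--     for tok in reversed(tokens):
--         if tok == "but not both":
--             pending += 1
--         elif tok == "or" and pending > 0:
--             out.append("xor")
--             pending -= 1
--         else:
--             out.append(tok)
--     out.reverse()
--     return out
-- ===== Notes on version B (the rewrite author's own statement) =====
-- stated objective: alternative
-- what changed: Replaces the backward index-scan per 'but not both' occurrence (nested loops plus list deletions) by a single right-to-left pass that keeps a counter of pending markers, turning each 'or' seen while the counter is positive into 'xor'.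
import Mathlib
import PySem

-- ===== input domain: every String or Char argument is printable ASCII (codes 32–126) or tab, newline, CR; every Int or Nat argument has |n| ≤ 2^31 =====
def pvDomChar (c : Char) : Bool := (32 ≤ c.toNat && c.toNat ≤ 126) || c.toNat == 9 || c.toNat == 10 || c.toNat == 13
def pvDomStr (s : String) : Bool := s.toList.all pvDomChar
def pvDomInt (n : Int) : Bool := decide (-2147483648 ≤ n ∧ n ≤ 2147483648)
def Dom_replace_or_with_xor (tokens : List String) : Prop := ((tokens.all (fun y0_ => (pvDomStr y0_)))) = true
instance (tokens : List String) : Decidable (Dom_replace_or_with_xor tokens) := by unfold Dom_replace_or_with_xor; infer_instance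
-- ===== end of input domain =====

-- B replaces A's per-marker backward scans (nested loops plus deletions) by one
-- right-to-left counting pass over the tokens (a different, single-pass algorithm).

-- ===== PORT A =====
-- inner loop: 'for i in range(index-1, -1, -1): if new_tokens[i] == "or": new_tokens[i] = "xor"; break'
-- (pyGetD/pySetD are exact here: every visited index is in range)
def pvAInner : List String → List Int → List String
  | l, [] => l
  | l, i :: rest =>
    if PySem.List.pyGetD l i "" = "or" then PySem.List.pySetD l i "xor"
    else pvAInner l rest

-- one iteration of the outer loop: the inner search, then 'del new_tokens[index]'
-- ('del' at an out-of-range index would raise; here index is always valid, so the none arm is unreachable)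
def pvAStep (l : List String) (idx : Int) : List String :=
  let l' := pvAInner l (PySem.List.pyRange (idx - 1) (-1) (-1))
  match PySem.List.pop? l' idx with
  | some r => r.2
  | none => l'

def replace_or_with_xor (tokens : List String) : List String :=
  let new_tokens := tokens
  let bnb_indices := (PySem.List.enumerate new_tokens).filterMap
    (fun p => if p.2 = "but not both" then some p.1 else none)
  (PySem.List.sorted bnb_indices id true).foldl pvAStep new_tokens

-- ===== PORT B =====
-- body of Source B's loop over reversed(tokens): state = (out, pending)
def pvBStep (st : List String × Nat) (tok : String) : List String × Nat :=
  if tok = "but not both" then (st.1, st.2 + 1)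
  else if tok = "or" ∧ 0 < st.2 then (st.1 ++ ["xor"], st.2 - 1)
  else (st.1 ++ [tok], st.2)

def replace_or_with_xor_alt (tokens : List String) : List String :=
  (tokens.reverse.foldl pvBStep ([], 0)).1.reverse

-- ===== PRECONDITION & SPEC =====
def Spec_replace_or_with_xor (tokens : List String) (out : List String) : Prop := out = replace_or_with_xor_alt tokens
instance (tokens : List String) (out : List String) : Decidable (Spec_replace_or_with_xor tokens out) := by unfold Spec_replace_or_with_xor; infer_instance

-- ===== CLAIM (what is proved, stated in full; the proofs are below) =====
def Claim_equal_replace_or_with_xor : Prop := ∀ (tokens : List String), Dom_replace_or_with_xor tokens → Spec_replace_or_with_xor tokens (replace_or_with_xor tokens)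

-- ===== LEMMAS AND PROOFS =====

-- reference right-to-left recursion: (output, pending) for a suffix, given pending from its right
def pvGo : List String → Nat → List String × Nat
  | [], p => ([], p)
  | t :: rest, p =>
    let oq := pvGo rest p
    if t = "but not both" then (oq.1, oq.2 + 1)
    else if t = "or" ∧ 0 < oq.2 then ("xor" :: oq.1, oq.2 - 1)
    else (t :: oq.1, oq.2)

-- replace the LAST "or" of a list, none if there is no "or"
def pvRlo : List String → Option (List String)
  | [] => none
  | t :: rest =>
    match pvRlo rest with
    | some r => some (t :: r)
    | none => if t = "or" then some ("xor" :: rest) else none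

def pvRlo' (u : List String) : List String := (pvRlo u).getD u

-- indices of "but not both", with enumeration starting at s
def pvIdx (s : Int) (l : List String) : List Int :=
  (PySem.List.enumerate l s).filterMap (fun p => if p.2 = "but not both" then some p.1 else none)

-- ---------- B-side lemmas ----------

theorem pvGo_append (u w : List String) (p : Nat) :
    pvGo (u ++ w) p = ((pvGo u (pvGo w p).2).1 ++ (pvGo w p).1, (pvGo u (pvGo w p).2).2) := by
  induction u with
  | nil => simp [pvGo]
  | cons t rest ih =>
    simp only [List.cons_append, pvGo, ih]
    by_cases h1 : t = "but not both" <;> by_cases h2 : t = "or" ∧ 0 < (pvGo rest (pvGo w p).2).2 <;>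
      simp [h1, h2]

theorem pvGo_noBnb (l : List String) (h : "but not both" ∉ l) : pvGo l 0 = (l, 0) := by
  induction l with
  | nil => rfl
  | cons t rest ih =>
    simp only [List.mem_cons, not_or] at h
    have ht : t ≠ "but not both" := fun hc => h.1 hc.symm
    simp [pvGo, ih h.2, ht]

theorem pvGo_noOr (l : List String) (h : "or" ∉ l) (p q : Nat) :
    (pvGo l p).1 = (pvGo l q).1 := by
  induction l generalizing p q with
  | nil => rfl
  | cons t rest ih =>
    simp only [List.mem_cons, not_or] at h
    by_cases h1 : t = "but not both"
    · simp [pvGo, h1, ih h.2 p q]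
    · have h2 : ¬ (t = "or" ∧ 0 < (pvGo rest p).2) := fun hc => h.1 hc.1.symm
      have h2' : ¬ (t = "or" ∧ 0 < (pvGo rest q).2) := fun hc => h.1 hc.1.symm
      simp [pvGo, h1, h2, h2', ih h.2 p q]

theorem pvGo_noOr_snd (l : List String) (h : "or" ∉ l) (p : Nat) :
    (pvGo l p).2 = (pvGo l 0).2 + p := by
  induction l generalizing p with
  | nil => simp [pvGo]
  | cons t rest ih =>
    simp only [List.mem_cons, not_or] at h
    have hto : t ≠ "or" := fun hc => h.1 hc.symm
    by_cases h1 : t = "but not both"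
    · simp [pvGo, h1, ih h.2 p]; omega
    · simp [pvGo, h1, hto, ih h.2 p]

theorem pvRlo_none (l : List String) (h : pvRlo l = none) : "or" ∉ l := by
  induction l with
  | nil => simp
  | cons t rest ih =>
    simp only [pvRlo] at h
    cases hr : pvRlo rest with
    | some r => simp [hr] at h
    | none =>
      rw [hr] at h
      by_cases ht : t = "or"
      · simp [ht] at h
      · simp only [List.mem_cons, not_or]
        exact ⟨fun hc => ht hc.symm, ih hr⟩

theorem pvGo_rlo (u u' : List String) (h : pvRlo u = some u') (p : Nat) :
    pvGo u (p + 1) = pvGo u' p := by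
  induction u generalizing u' with
  | nil => simp [pvRlo] at h
  | cons t rest ih =>
    simp only [pvRlo] at h
    cases hr : pvRlo rest with
    | some r =>
      rw [hr] at h
      injection h with h; subst h
      simp only [pvGo]
      rw [ih r hr]
    | none =>
      rw [hr] at h
      by_cases ht : t = "or"
      · simp only [ht, if_pos rfl] at h
        injection h with h; subst h
        have hor : "or" ∉ rest := pvRlo_none rest hr
        have h1 : (pvGo rest (p + 1)).1 = (pvGo rest p).1 := pvGo_noOr rest hor _ _
        have h2 : (pvGo rest (p + 1)).2 = (pvGo rest p).2 + 1 := by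
          rw [pvGo_noOr_snd rest hor (p + 1), pvGo_noOr_snd rest hor p]
          omega
        subst ht
        simp [pvGo, h1, h2]
      · simp [ht] at h

theorem pvAlt_eq_go_aux (u : List String) (acc : List String) (p : Nat) :
    u.reverse.foldl pvBStep (acc, p) = (acc ++ (pvGo u p).1.reverse, (pvGo u p).2) := by
  induction u using List.reverseRecOn generalizing acc p with
  | nil => simp [pvGo]
  | append_singleton us t ih =>
    rw [List.reverse_append, List.reverse_singleton, List.singleton_append, List.foldl_cons]
    rw [pvGo_append us [t] p]
    by_cases h1 : t = "but not both"
    · have hgo1 : pvGo [t] p = ([], p + 1) := by simp [pvGo, h1]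
      have hb : pvBStep (acc, p) t = (acc, p + 1) := by simp [pvBStep, h1]
      rw [hb, ih acc (p + 1), hgo1]
      simp
    · by_cases h2 : t = "or" ∧ 0 < p
      · have hgo1 : pvGo [t] p = (["xor"], p - 1) := by simp [pvGo, h1, h2]
        have hb : pvBStep (acc, p) t = (acc ++ ["xor"], p - 1) := by simp [pvBStep, h1, h2]
        rw [hb, ih _ _, hgo1]
        simp
      · have hgo1 : pvGo [t] p = ([t], p) := by simp [pvGo, h1, h2]
        have hb : pvBStep (acc, p) t = (acc ++ [t], p) := by simp [pvBStep, h1, h2]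
        rw [hb, ih _ _, hgo1]
        simp

theorem pvAlt_eq_go (tokens : List String) :
    replace_or_with_xor_alt tokens = (pvGo tokens 0).1 := by
  unfold replace_or_with_xor_alt
  rw [pvAlt_eq_go_aux tokens [] 0]
  simp

-- ---------- A-side lemmas ----------

theorem pvRlo_length (u u' : List String) (h : pvRlo u = some u') : u'.length = u.length := by
  induction u generalizing u' with
  | nil => simp [pvRlo] at h
  | cons t rest ih =>
    simp only [pvRlo] at h
    cases hr : pvRlo rest with
    | some r => rw [hr] at h; injection h with h; subst h; simp [ih r hr]
    | none =>
      rw [hr] at h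
      by_cases ht : t = "or"
      · simp only [ht, if_pos rfl] at h; injection h with h; subst h; simp
      · simp [ht] at h

theorem pvRlo_count (u u' : List String) (h : pvRlo u = some u') :
    u'.count "but not both" = u.count "but not both" := by
  induction u generalizing u' with
  | nil => simp [pvRlo] at h
  | cons t rest ih =>
    simp only [pvRlo] at h
    cases hr : pvRlo rest with
    | some r =>
      rw [hr] at h; injection h with h; subst h
      simp [List.count_cons, ih r hr]
    | none =>
      rw [hr] at h
      by_cases ht : t = "or"
      · simp only [ht, if_pos rfl] at h; injection h with h; subst h; subst ht
        simp [List.count_cons]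
      · simp [ht] at h

theorem pvRlo_append_singleton (u : List String) (t : String) :
    pvRlo (u ++ [t]) = if t = "or" then some (u ++ ["xor"]) else (pvRlo u).map (· ++ [t]) := by
  induction u with
  | nil => by_cases ht : t = "or" <;> simp [pvRlo, ht]
  | cons s rest ih =>
    by_cases ht : t = "or"
    · simp only [ht, if_pos rfl] at *
      simp only [List.cons_append, pvRlo, ih]
      rfl
    · simp only [ht, if_neg ht] at *
      simp only [List.cons_append, pvRlo, ih]
      cases hr : pvRlo rest with
      | some r => simp
      | none =>
        by_cases hs : s = "or" <;> simp [hs]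

theorem pvIdx_cons (s : Int) (t : String) (l : List String) :
    pvIdx s (t :: l) = (if t = "but not both" then [s] else []) ++ pvIdx (s + 1) l := by
  by_cases ht : t = "but not both" <;>
    simp [pvIdx, PySem.List.enumerate_cons, List.filterMap_cons, ht]

theorem pvIdx_append (s : Int) (u v : List String) :
    pvIdx s (u ++ v) = pvIdx s u ++ pvIdx (s + u.length) v := by
  simp [pvIdx, PySem.List.enumerate_append, List.filterMap_append]

theorem pvIdx_noBnb (s : Int) (v : List String) (h : "but not both" ∉ v) : pvIdx s v = [] := by
  induction v generalizing s with
  | nil => rfl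
  | cons t rest ih =>
    simp only [List.mem_cons, not_or] at h
    have htb : t ≠ "but not both" := fun hc => h.1 hc.symm
    rw [pvIdx_cons, if_neg htb, List.nil_append]
    exact ih _ h.2

theorem pvIdx_rlo (u u' : List String) (h : pvRlo u = some u') (s : Int) :
    pvIdx s u' = pvIdx s u := by
  induction u generalizing u' s with
  | nil => simp [pvRlo] at h
  | cons t rest ih =>
    simp only [pvRlo] at h
    cases hr : pvRlo rest with
    | some r =>
      rw [hr] at h; injection h with h; subst h
      rw [pvIdx_cons, pvIdx_cons, ih r hr]
    | none =>
      rw [hr] at h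
      by_cases ht : t = "or"
      · simp only [ht, if_pos rfl] at h; injection h with h; subst h
        rw [pvIdx_cons, pvIdx_cons]
        simp [ht]
      · simp [ht] at h

theorem pvIdx_ge (s : Int) (l : List String) (i : Int) (h : i ∈ pvIdx s l) : s ≤ i := by
  induction l generalizing s with
  | nil => simp [pvIdx] at h
  | cons t rest ih =>
    rw [pvIdx_cons] at h
    by_cases ht : t = "but not both"
    · rw [if_pos ht, List.singleton_append, List.mem_cons] at h
      rcases h with h | h
      · omega
      · have := ih (s + 1) h; omega
    · rw [if_neg ht, List.nil_append] at h
      have := ih (s + 1) h; omega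

theorem pvIdx_pairwise (s : Int) (l : List String) : (pvIdx s l).Pairwise (· < ·) := by
  induction l generalizing s with
  | nil => simp [pvIdx]
  | cons t rest ih =>
    rw [pvIdx_cons]
    by_cases ht : t = "but not both"
    · rw [if_pos ht, List.singleton_append]
      refine List.pairwise_cons.2 ⟨fun i hi => ?_, ih (s + 1)⟩
      have := pvIdx_ge (s + 1) rest i hi; omega
    · rw [if_neg ht, List.nil_append]
      exact ih (s + 1)

theorem pvSorted_idx (s : Int) (l : List String) :
    PySem.List.sorted (pvIdx s l) id true = (pvIdx s l).reverse := by
  apply PySem.List.sorted_rev_eq_of_perm_of_pairwise_gt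
  · exact (pvIdx s l).reverse_perm
  · rw [List.pairwise_reverse]
    simpa using pvIdx_pairwise s l

theorem pvAInner_spec (u w : List String) :
    pvAInner (u ++ w) (PySem.List.pyRange ((u.length : Int) - 1) (-1) (-1)) = pvRlo' u ++ w := by
  induction u using List.reverseRecOn generalizing w with
  | nil =>
    rw [PySem.List.pyRange_neg_one_eq_nil (by norm_num)]
    rfl
  | append_singleton us t ih =>
    have hlen : ((us ++ [t]).length : Int) - 1 = (us.length : Int) := by simp
    rw [hlen, PySem.List.pyRange_neg_one_cons (by omega)]
    have hget : PySem.List.pyGetD (us ++ [t] ++ w) (us.length : Int) "" = t := by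
      rw [PySem.List.pyGetD_natCast, List.getD_eq_getElem _ _ (by simp)]
      simp [List.getElem_append]
    by_cases ht : t = "or"
    · subst ht
      simp only [pvAInner, hget, if_pos rfl]
      have hset : PySem.List.pySetD (us ++ ["or"] ++ w) (us.length : Int) "xor"
          = us ++ ["xor"] ++ w := by
        unfold PySem.List.pySetD
        rw [PySem.List.pySet?_natCast _ _ _ (by simp)]
        rw [Option.getD_some, List.append_assoc, List.set_append_right _ _ (le_refl _)]
        simp
      have h2 : pvRlo' (us ++ ["or"]) = us ++ ["xor"] := by
        unfold pvRlo'
        rw [pvRlo_append_singleton, if_pos rfl]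
        rfl
      rw [hset, h2]
      simp
    · simp only [pvAInner, hget, if_neg ht]
      rw [List.append_assoc, List.singleton_append, ih (t :: w)]
      have h2 : pvRlo' (us ++ [t]) = pvRlo' us ++ [t] := by
        unfold pvRlo'
        rw [pvRlo_append_singleton, if_neg ht]
        cases pvRlo us <;> simp
      rw [h2, List.append_assoc, List.singleton_append]

theorem pvEraseIdx_middle (u : List String) (x : String) (v : List String) :
    (u ++ x :: v).eraseIdx u.length = u ++ v := by
  induction u with
  | nil => rfl
  | cons s rest ih => simp [List.eraseIdx, ih]

theorem pvAStep_spec (u v : List String) :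
    pvAStep (u ++ "but not both" :: v) (u.length : Int) = pvRlo' u ++ v := by
  have hlen : (pvRlo' u).length = u.length := by
    unfold pvRlo'
    cases hr : pvRlo u with
    | some r => simpa using pvRlo_length u r hr
    | none => simp
  have hpop := PySem.List.pop?_natCast (pvRlo' u ++ "but not both" :: v) u.length
    (by simp [hlen])
  have herase : (pvRlo' u ++ "but not both" :: v).eraseIdx u.length = pvRlo' u ++ v := by
    have h := pvEraseIdx_middle (pvRlo' u) "but not both" v
    rwa [hlen] at h
  unfold pvAStep
  rw [pvAInner_spec u ("but not both" :: v)]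
  simp only [hpop, herase]

theorem pvA_unfold (l : List String) :
    replace_or_with_xor l = (PySem.List.sorted (pvIdx 0 l) id true).foldl pvAStep l := rfl

theorem pvIdx_rlo' (u : List String) (s : Int) : pvIdx s (pvRlo' u) = pvIdx s u := by
  unfold pvRlo'
  cases hr : pvRlo u with
  | some r => simpa using pvIdx_rlo u r hr s
  | none => simp

theorem pvA_reduce (u v : List String) (hv : "but not both" ∉ v) :
    replace_or_with_xor (u ++ "but not both" :: v) = replace_or_with_xor (pvRlo' u ++ v) := by
  rw [pvA_unfold, pvA_unfold, pvSorted_idx, pvSorted_idx]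
  have hL : pvIdx 0 (u ++ "but not both" :: v) = pvIdx 0 u ++ [(u.length : Int)] := by
    rw [pvIdx_append, pvIdx_cons]
    simp [pvIdx_noBnb _ v hv]
  have hR : pvIdx 0 (pvRlo' u ++ v) = pvIdx 0 u := by
    rw [pvIdx_append, pvIdx_rlo', pvIdx_noBnb _ v hv]
    simp
  rw [hL, hR, List.reverse_append, List.reverse_singleton, List.singleton_append,
    List.foldl_cons, pvAStep_spec]

-- ---------- main ----------

theorem pvSplit_last (l : List String) (h : "but not both" ∈ l) :
    ∃ u v, l = u ++ "but not both" :: v ∧ "but not both" ∉ v := by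
  induction l using List.reverseRecOn with
  | nil => simp at h
  | append_singleton us t ih =>
    by_cases ht : t = "but not both"
    · exact ⟨us, [], by simp [ht], by simp⟩
    · have hm : "but not both" ∈ us := by
        rcases List.mem_append.1 h with h1 | h1
        · exact h1
        · simp at h1; exact absurd h1.symm ht
      rcases ih hm with ⟨u, v, hev, hnv⟩
      refine ⟨u, v ++ [t], by simp [hev], ?_⟩
      simp only [List.mem_append, List.mem_singleton, not_or]
      exact ⟨hnv, fun hc => ht hc.symm⟩

theorem pvMain : ∀ (n : Nat) (l : List String), l.count "but not both" = n →
    replace_or_with_xor l = (pvGo l 0).1 := by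
  intro n
  induction n using Nat.strong_induction_on with
  | _ n ih =>
    intro l hn
    by_cases hb : "but not both" ∈ l
    · rcases pvSplit_last l hb with ⟨u, v, hev, hnv⟩
      subst hev
      rw [pvA_reduce u v hnv]
      have hcount : (pvRlo' u ++ v).count "but not both" < n := by
        have h1 : (pvRlo' u).count "but not both" = u.count "but not both" := by
          unfold pvRlo'
          cases hr : pvRlo u with
          | some r => simpa using pvRlo_count u r hr
          | none => simp
        rw [← hn]
        simp [List.count_append, List.count_cons, h1]
      have hA := ih _ hcount (pvRlo' u ++ v) rfl
      rw [hA]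
      -- B side: pvGo (u ++ bnb :: v) 0 has the same output
      have hgoL : (pvGo (u ++ "but not both" :: v) 0).1 = (pvGo u 1).1 ++ v := by
      -- inner part: pvGo ("but not both" :: v) 0 = (v, 1)
        have hv0 : pvGo v 0 = (v, 0) := pvGo_noBnb v hnv
        have hin : pvGo ("but not both" :: v) 0 = (v, 1) := by
          simp [pvGo, hv0]
        rw [pvGo_append, hin]
      have hgoR : (pvGo (pvRlo' u ++ v) 0).1 = (pvGo (pvRlo' u) 0).1 ++ v := by
        have hv0 : pvGo v 0 = (v, 0) := pvGo_noBnb v hnv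
        rw [pvGo_append, hv0]
      rw [hgoL, hgoR]
      unfold pvRlo'
      cases hr : pvRlo u with
      | some r =>
        rw [Option.getD_some, ← pvGo_rlo u r hr 0]
      | none =>
        rw [Option.getD_none]
        rw [pvGo_noOr u (pvRlo_none u hr) 1 0]
    · have hidx : pvIdx 0 l = [] := pvIdx_noBnb 0 l hb
      rw [pvA_unfold, pvSorted_idx, hidx]
      rw [pvGo_noBnb l hb]
      rfl

-- ===== VERDICT (by name: the statement is the Claim_ definition above) =====
theorem replace_or_with_xor_spec : Claim_equal_replace_or_with_xor := by
  intro tokens _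
  unfold Spec_replace_or_with_xor
  rw [pvAlt_eq_go, pvMain (tokens.count "but not both") tokens rfl]
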